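-- pv_equiv track=rewrite | github.com/pypi-data/pypi-mirror-379 | packages/muse-lang/muse_lang-0.6.3.tar.gz/muse_lang-0.6.3/muse/engines/rule_engine.py | get_result_col
-- ===== SOURCE A (Python) =====
-- def get_result_col(columns):
--     score_list = list()
--     for col in columns:
--         score = 0
--         if '-' in str(col):
--             score += 1
--         if '+' in str(col):
--             score += 1
--         if '*' in str(col):
--             score += 1
--         if '/' in str(col):
--             score += 1
--         score_list.append(score)
--
--     result_col = None
--     if len(score_list):
--         max_value = max(score_list)  # 最大值
--         if max_value > 0:
--             max_index = score_list.index(max_value)  # 第一个最大值的索引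
--             result_col = columns[max_index]
--     return result_col
-- ===== SOURCE B (Python) =====
-- def get_result_col(columns):
--     best_col = None
--     best_score = 0
--     for col in columns:
--         s = str(col)
--         score = ('-' in s) + ('+' in s) + ('*' in s) + ('/' in s)
--         if score > best_score:
--             best_score = score
--             best_col = col
--     return best_col
-- ===== Notes on version B (the rewrite author's own statement) =====
-- stated objective: simpler
-- what changed: Replaces build-score-list, then max(), then list.index(), then indexing back into columns with a single running-max pass tracking (best_col, best_score); strict '>' keeps the first maximal column and the 0 start keeps the positivity gate and the None result for empty input.
import Mathlib
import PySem

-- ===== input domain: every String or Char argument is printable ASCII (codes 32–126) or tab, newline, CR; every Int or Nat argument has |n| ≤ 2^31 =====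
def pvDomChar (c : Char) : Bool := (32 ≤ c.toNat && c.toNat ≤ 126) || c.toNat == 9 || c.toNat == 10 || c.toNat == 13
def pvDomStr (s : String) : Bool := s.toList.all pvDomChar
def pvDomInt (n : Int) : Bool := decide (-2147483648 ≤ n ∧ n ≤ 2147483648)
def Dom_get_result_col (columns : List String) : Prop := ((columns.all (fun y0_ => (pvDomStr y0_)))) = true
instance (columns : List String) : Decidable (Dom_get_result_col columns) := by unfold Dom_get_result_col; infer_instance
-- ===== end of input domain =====

-- ===== PORT A =====
-- A: per-column score via a mutable counter and four if-statements
def pvScoreA (s : String) : Int :=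
  let score : Int := 0
  let score := if PySem.Str.isIn "-" s then score + 1 else score
  let score := if PySem.Str.isIn "+" s then score + 1 else score
  let score := if PySem.Str.isIn "*" s then score + 1 else score
  let score := if PySem.Str.isIn "/" s then score + 1 else score
  score

def get_result_col (columns : List String) : Option String :=
  let score_list := columns.map pvScoreA
  if score_list.length ≠ 0 then
    match PySem.List.max? score_list (fun y => y) with
    | none => none          -- unreachable: score_list is nonempty
    | some max_value =>
      if max_value > 0 then
        match PySem.List.index? score_list max_value with
        | none => none      -- unreachable: max_value ∈ score_list
        | some max_index => PySem.List.pyGet? columns (max_index : Int)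
      else none
  else none

-- ===== PORT B =====
-- B: score as a sum of the four tests; single running-max pass over columns
def pvScoreB (s : String) : Int :=
  (if PySem.Str.isIn "-" s then (1 : Int) else 0) +
  (if PySem.Str.isIn "+" s then (1 : Int) else 0) +
  (if PySem.Str.isIn "*" s then (1 : Int) else 0) +
  (if PySem.Str.isIn "/" s then (1 : Int) else 0)

def pvStepB (st : Option String × Int) (col : String) : Option String × Int :=
  let score := pvScoreB col
  if score > st.2 then (some col, score) else st

def get_result_col_alt (columns : List String) : Option String :=
  (columns.foldl pvStepB (none, 0)).1

-- ===== PRECONDITION & SPEC =====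
def Spec_get_result_col (columns : List String) (out : Option String) : Prop := out = get_result_col_alt columns
instance (columns : List String) (out : Option String) : Decidable (Spec_get_result_col columns out) := by unfold Spec_get_result_col; infer_instance

-- ===== CLAIM (what is proved, stated in full; the proofs are below) =====
def Claim_equal_get_result_col : Prop := ∀ (columns : List String), Dom_get_result_col columns → Spec_get_result_col columns (get_result_col columns)

-- ===== LEMMAS AND PROOFS =====

-- the two scoring styles agree
theorem pvScore_eq (s : String) : pvScoreA s = pvScoreB s := by
  unfold pvScoreA pvScoreB
  split_ifs <;> decide

theorem pvScoreB_nonneg (s : String) : 0 ≤ pvScoreB s := by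
  unfold pvScoreB
  split_ifs <;> decide

-- running max of scores starting from bs
def pvRunMax (bs : Int) (xs : List String) : Int :=
  xs.foldl (fun m c => max m (pvScoreB c)) bs

theorem pvRunMax_nil (bs : Int) : pvRunMax bs [] = bs := rfl

theorem pvRunMax_cons (bs : Int) (c : String) (cs : List String) :
    pvRunMax bs (c :: cs) = pvRunMax (max bs (pvScoreB c)) cs := rfl

theorem pvRunMax_ge (xs : List String) : ∀ bs : Int, bs ≤ pvRunMax bs xs := by
  induction xs with
  | nil => intro bs; simp [pvRunMax_nil]
  | cons c cs ih =>
      intro bs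
      rw [pvRunMax_cons]
      exact le_trans (le_max_left _ _) (ih _)

-- characterization of B's running-max fold
theorem pvFold_fst (xs : List String) : ∀ (bc : Option String) (bs : Int),
    (xs.foldl pvStepB (bc, bs)).1 =
      if pvRunMax bs xs > bs then xs.find? (fun c => pvScoreB c == pvRunMax bs xs) else bc := by
  induction xs with
  | nil => intro bc bs; simp [pvRunMax_nil]
  | cons c cs ih =>
      intro bc bs
      rw [List.foldl_cons, pvRunMax_cons]
      by_cases hs : pvScoreB c > bs
      · rw [show pvStepB (bc, bs) c = (some c, pvScoreB c) by simp [pvStepB, hs]]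
        rw [ih (some c) (pvScoreB c)]
        rw [max_eq_right (le_of_lt hs)]
        have hge := pvRunMax_ge cs (pvScoreB c)
        by_cases hM : pvRunMax (pvScoreB c) cs > pvScoreB c
        · have hcond : pvRunMax (pvScoreB c) cs > bs := lt_trans hs hM
          rw [if_pos hM, if_pos hcond, List.find?_cons]
          have hne : (pvScoreB c == pvRunMax (pvScoreB c) cs) = false := by
            simp only [beq_eq_false_iff_ne]; omega
          rw [hne]
        · have heq : pvRunMax (pvScoreB c) cs = pvScoreB c := le_antisymm (by omega) hge
          rw [if_neg hM, heq, if_pos hs, List.find?_cons]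
          rw [beq_self_eq_true (pvScoreB c)]
      · rw [show pvStepB (bc, bs) c = (bc, bs) by simp [pvStepB, hs]]
        rw [ih bc bs]
        rw [max_eq_left (by omega : pvScoreB c ≤ bs)]
        by_cases hM : pvRunMax bs cs > bs
        · rw [if_pos hM, if_pos hM, List.find?_cons]
          have hne : (pvScoreB c == pvRunMax bs cs) = false := by
            simp only [beq_eq_false_iff_ne]; omega
          rw [hne]
        · rw [if_neg hM, if_neg hM]

-- A's index?-then-pyGet? over the mapped score list is find? on the columns
theorem pvIndex_get (xs : List String) (m : Int) :
    (match PySem.List.index? (xs.map pvScoreB) m with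
      | none => none
      | some i => PySem.List.pyGet? xs (i : Int)) =
      xs.find? (fun c => pvScoreB c == m) := by
  induction xs with
  | nil => simp [PySem.List.index?]
  | cons c cs ih =>
      rw [List.map_cons, List.find?_cons]
      by_cases h : pvScoreB c = m
      · subst h
        rw [PySem.List.index?_cons_self]
        simp
      · have hx : pvScoreB c ≠ m := h
        have hne : (pvScoreB c == m) = false := by simp [h]
        rw [PySem.List.index?_cons_of_ne _ hx, hne]
        rw [← ih]
        cases hidx : PySem.List.index? (cs.map pvScoreB) m with
        | none => simp
        | some i =>
            simp only [Option.map_some]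
            rw [PySem.List.pyGet?_natCast, PySem.List.pyGet?_natCast]
            simp

-- A's max over the mapped score list is the running max from 0
theorem pvMax_eq (c : String) (cs : List String) :
    PySem.List.max? ((c :: cs).map pvScoreB) (fun y => y) = some (pvRunMax 0 (c :: cs)) := by
  rw [List.map_cons, PySem.List.max?_id_cons]
  congr 1
  rw [pvRunMax_cons, max_eq_right (pvScoreB_nonneg c)]
  show (cs.map pvScoreB).foldl max (pvScoreB c) = cs.foldl (fun m x => max m (pvScoreB x)) (pvScoreB c)
  rw [List.foldl_map]

-- ===== VERDICT (by name: the statement is the Claim_ definition above) =====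
theorem get_result_col_spec : Claim_equal_get_result_col := by
  intro columns _
  unfold Spec_get_result_col get_result_col get_result_col_alt
  have hmap : columns.map pvScoreA = columns.map pvScoreB := by simp [pvScore_eq]
  rw [hmap]
  cases columns with
  | nil => simp
  | cons c cs =>
      rw [pvFold_fst (c :: cs) none 0]
      simp only [List.length_map, List.length_cons, ne_eq]
      rw [if_pos (by omega : ¬ (cs.length + 1 = 0))]
      have h0 : (0 : Int) ≤ pvRunMax 0 (c :: cs) := pvRunMax_ge (c :: cs) 0
      split
      · next heq => rw [pvMax_eq c cs] at heq; cases heq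
      · next mv heq =>
          rw [pvMax_eq c cs] at heq
          injection heq with hmv
          subst hmv
          by_cases hM : pvRunMax 0 (c :: cs) > 0
          · rw [if_pos hM, if_pos hM]
            exact pvIndex_get (c :: cs) (pvRunMax 0 (c :: cs))
          · rw [if_neg hM, if_neg hM]
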